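-- pv_equiv track=rewrite | github.com/rookinc/xalchemy_lab | g900/scripts/g15_action_policy_transition_delta.py | parse_start_signature
-- ===== SOURCE A (Python) =====
-- def parse_start_signature(label: str) -> tuple[str, str]:
--     parts = label.split("__")
--     edits = []
--     positions = []
--
--     for part in parts:
--         if not part.startswith("edit_pos"):
--             continue
--         rest = part[len("edit_pos"):]
--         digits = []
--         i = 0
--         while i < len(rest) and rest[i].isdigit():
--             digits.append(rest[i])
--             i += 1
--         pos = int("".join(digits))
--         tail = rest[i + 1:] if i < len(rest) and rest[i] == "_" else rest[i:]
--         if "_to_" not in tail: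
--             continue
--         frm, to = tail.split("_to_", 1)
--         edits.append((pos, frm, to))
--         positions.append(pos)
--
--     edits.sort()
--     support = "|".join(str(pos) for pos, _, _ in edits)
--     transition = "|".join(f"{pos}:{frm}->{to}" for pos, frm, to in edits)
--     return support, transition
-- ===== SOURCE B (Python) =====
-- def parse_start_signature(label: str) -> tuple[str, str]:
--     # Single find-driven scan over the raw string: walk "__"-separated spans by index,
--     # never building a parts list; frm/to are cut out with find("_to_", j, end).
--     edits = []
--     i, n = 0, len(label)
--     while True:
--         cut = label.find("__", i)
--         end = n if cut < 0 else cut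
--         if end - i >= 8 and label.startswith("edit_pos", i):
--             j = i + 8
--             while j < end and label[j].isdigit():
--                 j += 1
--             pos = int(label[i + 8:j])
--             if j < end and label[j] == "_":
--                 j += 1
--             k = label.find("_to_", j, end)
--             if k >= 0:
--                 edits.append((pos, label[j:k], label[k + 4:end]))
--         if cut < 0:
--             break
--         i = cut + 2
--     edits.sort()
--     support = "|".join(str(p) for p, _, _ in edits)
--     transition = "|".join(f"{p}:{f}->{t}" for p, f, t in edits)
--     return support, transition
-- ===== Notes on version B (the rewrite author's own statement) =====
-- stated objective: alternative
-- what changed: A splits the label into a parts list and parses each part with startswith, a character-by-character digit loop, tail slicing and an 'in'+split('_to_',1) pass; B never builds a parts list: it walks the raw string with a single find('__')-driven index loop, checks the prefix in place with startswith('edit_pos', i), and cuts frm/to out with one bounded find('_to_', j, end) instead of a membership test plus split.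
import Mathlib
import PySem

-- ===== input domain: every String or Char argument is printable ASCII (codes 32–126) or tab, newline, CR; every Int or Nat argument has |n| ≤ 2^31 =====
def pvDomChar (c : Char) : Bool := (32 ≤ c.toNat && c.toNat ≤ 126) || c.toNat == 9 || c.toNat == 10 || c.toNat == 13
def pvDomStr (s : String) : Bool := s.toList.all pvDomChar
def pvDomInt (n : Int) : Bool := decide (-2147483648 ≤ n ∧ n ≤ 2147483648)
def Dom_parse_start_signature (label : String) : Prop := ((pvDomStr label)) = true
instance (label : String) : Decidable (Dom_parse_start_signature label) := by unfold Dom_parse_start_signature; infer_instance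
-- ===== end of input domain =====

-- B replaces A's split-into-parts pipeline by a single find()-driven scan over the raw
-- label: it walks the "__"-separated spans by index and cuts frm/to out with a bounded
-- find("_to_") instead of slicing parts and splitting them (objective: alternative).

-- ===== PORT A =====
-- helpers shared by both ports: both Pythons sort the same edit list the same way
-- (Python's stable sort on (int,str,str) tuples; ties are identical tuples, so the
-- insertion sort with the strict lexicographic comparator yields exactly Python's result)
-- and build the two joined strings with the same expressions.
def pvLexLT (a b : Int × List Char × List Char) : Bool :=
  decide (a.1 < b.1) ||
    (a.1 == b.1 && (decide (a.2.1 < b.2.1) || (a.2.1 == b.2.1 && decide (a.2.2 < b.2.2))))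

def pvSortEdits (es : List (Int × List Char × List Char)) : List (Int × List Char × List Char) :=
  es.foldl (fun acc x => PySem.List.insertBy pvLexLT x acc) []

def pvOut (edits : List (Int × List Char × List Char)) : String × String :=
  (String.ofList (PySem.Chars.join ['|'] (edits.map fun e => PySem.Int.toChars e.1)),
   String.ofList (PySem.Chars.join ['|']
     (edits.map fun e => PySem.Int.toChars e.1 ++ ':' :: e.2.1 ++ '-' :: '>' :: e.2.2)))

-- A's while-loop over rest with index i: returns (collected digits, rest from i on)
def pvA_digits (l : List Char) : List Char × List Char :=
  match l with
  | [] => ([], [])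
  | c :: cs =>
    if PySem.Chars.isdigit c then (c :: (pvA_digits cs).1, (pvA_digits cs).2)
    else ([], c :: cs)

-- A's loop body; state none = the int("") ValueError has occurred (excluded by Pre_)
def pvA_step (st : Option (List (Int × List Char × List Char))) (part : List Char) :
    Option (List (Int × List Char × List Char)) :=
  match st with
  | none => none
  | some edits =>
    if PySem.Chars.startswith part ("edit_pos".toList) then
      let rest := part.drop 8
      let dr := pvA_digits rest
      match PySem.Int.ofChars? dr.1 with
      | none => none
      | some pos =>
        let tail := match dr.2 with
          | '_' :: t => t
          | t => t
        if PySem.Chars.isIn ("_to_".toList) tail then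
          let pieces := PySem.Chars.splitOnMax tail ("_to_".toList) 1
          some (edits ++ [(pos, pieces.headD [], (pieces.drop 1).headD [])])
        else some edits
    else some edits

def parse_start_signature (label : String) : String × String :=
  match (PySem.Chars.splitOn label.toList ("__".toList)).foldl pvA_step (some []) with
  | none => ("", "")   -- unreachable under Pre_ (the ValueError inputs are excluded)
  | some edits => pvOut (pvSortEdits edits)

-- ===== PORT B =====
-- B's scan position i is represented by the remaining suffix label[i:]; every
-- label.find(sub, i[, end]) of Source B becomes PySem.Chars.find on the corresponding
-- sub-list (Python's s.find(sub, i, end) equals i + s[i:end].find(sub), or -1), and the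
-- slices label[a:b] become take/drop of the same spans — exact on every input.

-- B's inner digit while-loop: how far j advances past i+8 (rest = label[i+8:end])
def pvB_digits (rest : List Char) : Nat :=
  match rest with
  | [] => 0
  | c :: cs => if PySem.Chars.isdigit c then pvB_digits cs + 1 else 0

-- B's per-span body (span = label[i:end]); none = the int("") ValueError
def pvB_span (st : Option (List (Int × List Char × List Char))) (span : List Char) :
    Option (List (Int × List Char × List Char)) :=
  match st with
  | none => none
  | some es =>
    if decide (8 ≤ span.length) && PySem.Chars.startswith span ("edit_pos".toList) then
      let rest := span.drop 8
      let j := pvB_digits rest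
      match PySem.Int.ofChars? (rest.take j) with
      | none => none
      | some pos =>
        let t0 := rest.drop j
        let tail := if t0.head? = some '_' then t0.tail else t0
        let k := PySem.Chars.find tail ("_to_".toList)
        if k = -1 then some es
        else some (es ++ [(pos, tail.take k.toNat, tail.drop (k.toNat + 4))])
    else some es

-- B's outer while-True loop; fuel only makes the recursion structural (the loop
-- advances past each "__", so label.length + 1 steps always suffice)
def pvB_loop (l : List Char) (fuel : Nat) (st : Option (List (Int × List Char × List Char))) :
    Option (List (Int × List Char × List Char)) :=
  match fuel with
  | 0 => st
  | fuel + 1 =>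
    let cut := PySem.Chars.find l ("__".toList)
    let span := if cut = -1 then l else l.take cut.toNat
    let st' := pvB_span st span
    if cut = -1 then st' else pvB_loop (l.drop (cut.toNat + 2)) fuel st'

def parse_start_signature_alt (label : String) : String × String :=
  match pvB_loop label.toList (label.toList.length + 1) (some []) with
  | none => ("", "")   -- unreachable under Pre_
  | some es => pvOut (pvSortEdits es)

-- ===== PRECONDITION & SPEC =====
-- Pre_ excludes exactly the labels on which A (and B) raise ValueError: a "__"-part that
-- starts with "edit_pos" but is not followed by a digit makes both call int("").
def Pre_parse_start_signature (label : String) : Prop :=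
  ∀ part ∈ PySem.Chars.splitOn label.toList ("__".toList),
    PySem.Chars.startswith part ("edit_pos".toList) = true →
    PySem.Chars.strIsdigit ((part.drop 8).take 1) = true
instance (label : String) : Decidable (Pre_parse_start_signature label) := by
  unfold Pre_parse_start_signature; infer_instance
def pvWitness_parse_start_signature : String := "edit_pos3_a_to_b__edit_pos1_c_to_d"

def Spec_parse_start_signature (label : String) (out : String × String) : Prop :=
  out = parse_start_signature_alt label
instance (label : String) (out : String × String) : Decidable (Spec_parse_start_signature label out) := by
  unfold Spec_parse_start_signature; infer_instance

-- ===== CLAIM (what is proved, stated in full; the proofs are below) =====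
def Claim_equal_parse_start_signature : Prop :=
  ∀ (label : String), Dom_parse_start_signature label → Pre_parse_start_signature label →
    Spec_parse_start_signature label (parse_start_signature label)

-- ===== LEMMAS AND PROOFS =====

-- first-occurrence splitter used only by the proofs: (before, sep, after) at the first
-- occurrence of sep, (l, [], []) when sep does not occur
def pvPartition (l sep : List Char) : List Char × List Char × List Char :=
  match l with
  | [] => ([], [], [])
  | c :: rest =>
    if sep.isPrefixOf (c :: rest) then ([], sep, (c :: rest).drop sep.length)
    else
      ((c :: (pvPartition rest sep).1), (pvPartition rest sep).2.1, (pvPartition rest sep).2.2)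

theorem pvPartition_cons_pos (sep : List Char) (c : Char) (rest : List Char)
    (h : sep.isPrefixOf (c :: rest) = true) :
    pvPartition (c :: rest) sep = ([], sep, (c :: rest).drop sep.length) := by
  simp [pvPartition, h]

theorem pvPartition_cons_neg (sep : List Char) (c : Char) (rest : List Char)
    (h : ¬ sep.isPrefixOf (c :: rest) = true) :
    pvPartition (c :: rest) sep =
      (c :: (pvPartition rest sep).1, (pvPartition rest sep).2.1, (pvPartition rest sep).2.2) := by
  simp [pvPartition, h]

theorem pvPartition_concat (l sep : List Char) :
    (pvPartition l sep).1 ++ (pvPartition l sep).2.1 ++ (pvPartition l sep).2.2 = l := by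
  induction l with
  | nil => rfl
  | cons c rest ih =>
    by_cases h : sep.isPrefixOf (c :: rest)
    · rw [pvPartition_cons_pos sep c rest h]
      have hpre : sep <+: c :: rest := List.isPrefixOf_iff_prefix.mp h
      obtain ⟨t, ht⟩ := hpre
      simp [← ht]
    · rw [pvPartition_cons_neg sep c rest h]
      simp [ih]

theorem pvPartition_sep (l sep : List Char) (h : (pvPartition l sep).2.1 ≠ []) :
    (pvPartition l sep).2.1 = sep := by
  induction l with
  | nil => exact absurd rfl h
  | cons c rest ih =>
    by_cases hp : sep.isPrefixOf (c :: rest)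
    · rw [pvPartition_cons_pos sep c rest hp]
    · rw [pvPartition_cons_neg sep c rest hp] at h ⊢
      exact ih h

theorem pvPartition_found_iff (l sep : List Char) (hsep : sep ≠ []) :
    (pvPartition l sep).2.1 = [] ↔ ¬ sep <:+: l := by
  induction l with
  | nil =>
    simp only [pvPartition]
    constructor
    · intro _ h
      exact hsep (List.eq_nil_of_infix_nil h)
    · intro _; trivial
  | cons c rest ih =>
    by_cases h : sep.isPrefixOf (c :: rest)
    · rw [pvPartition_cons_pos sep c rest h]
      have hpre : sep <+: c :: rest := List.isPrefixOf_iff_prefix.mp h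
      simp [hsep, hpre.isInfix]
    · rw [pvPartition_cons_neg sep c rest h]
      simp only []
      rw [ih]
      have hnp : ¬ sep <+: c :: rest := fun hp => h (List.isPrefixOf_iff_prefix.mpr hp)
      constructor
      · intro hni hinf
        rcases (List.infix_cons_iff).mp hinf with hp | hi
        · exact hnp hp
        · exact hni hi
      · intro hni hi
        exact hni (List.infix_cons_iff.mpr (Or.inr hi))

-- find points at the first occurrence, via pvPartition
theorem pvFindGo_eq (sep l : List Char) (k : Nat) (hsep : sep ≠ []) :
    PySem.Chars.find.go sep l k =
      (if (pvPartition l sep).2.1 = [] then -1 else (k : Int) + (pvPartition l sep).1.length) := by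
  induction l generalizing k with
  | nil => simp [PySem.Chars.find.go, pvPartition, hsep]
  | cons c rest ih =>
    by_cases h : sep.isPrefixOf (c :: rest)
    · rw [pvPartition_cons_pos sep c rest h]
      simp [PySem.Chars.find.go, h, hsep]
    · rw [pvPartition_cons_neg sep c rest h]
      simp only [PySem.Chars.find.go]
      rw [if_neg (by simp [h]), ih (k+1)]
      by_cases he : (pvPartition rest sep).2.1 = []
      · simp [he]
      · simp only [he, if_false, List.length_cons]
        push_cast
        ring

theorem pvFind_eq (l sep : List Char) (hsep : sep ≠ []) :
    PySem.Chars.find l sep =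
      (if (pvPartition l sep).2.1 = [] then -1 else ((pvPartition l sep).1.length : Int)) := by
  rw [show PySem.Chars.find l sep = PySem.Chars.find.go sep l 0 from rfl, pvFindGo_eq sep l 0 hsep]
  simp

-- the full list of "__"-parts, as B's loop produces them
def pvPieces (sep pre l : List Char) : List (List Char) :=
  if h : (pvPartition l sep).2.1 = [] then [pre ++ l]
  else (pre ++ (pvPartition l sep).1) :: pvPieces sep [] ((pvPartition l sep).2.2)
termination_by l.length
decreasing_by
  have hc := pvPartition_concat l sep
  have hl : (pvPartition l sep).1.length + (pvPartition l sep).2.1.length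
      + (pvPartition l sep).2.2.length = l.length := by
    have h2 := congrArg List.length hc
    simp at h2
    omega
  have hpos : 0 < (pvPartition l sep).2.1.length := List.length_pos_iff.mpr h
  omega

theorem pvPieces_cons (sep pre : List Char) (c : Char) (rest : List Char)
    (h : ¬ sep.isPrefixOf (c :: rest) = true) :
    pvPieces sep pre (c :: rest) = pvPieces sep (pre ++ [c]) rest := by
  conv_lhs => rw [pvPieces]
  conv_rhs => rw [pvPieces]
  rw [pvPartition_cons_neg sep c rest h]
  by_cases he : (pvPartition rest sep).2.1 = []
  · simp [he]
  · simp [he]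

theorem pvSplitOnGo_eq (sep : List Char) (hsep : sep ≠ []) (fuel : Nat) (l cur : List Char)
    (acc : List (List Char)) (hf : l.length < fuel) :
    PySem.Chars.splitOn.go sep fuel l cur acc = acc.reverse ++ pvPieces sep cur.reverse l := by
  induction fuel generalizing l cur acc with
  | zero => omega
  | succ f ih =>
    cases l with
    | nil =>
      rw [pvPieces]
      simp [PySem.Chars.splitOn.go, pvPartition]
    | cons c rest =>
      by_cases h : sep.isPrefixOf (c :: rest)
      · simp only [PySem.Chars.splitOn.go, h, if_pos]
        rw [ih ((c :: rest).drop sep.length) [] (cur.reverse :: acc)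
          (by
            have hs : 1 ≤ sep.length := List.length_pos_iff.mpr hsep
            simp only [List.length_drop, List.length_cons]
            simp only [List.length_cons] at hf
            omega)]
        conv_rhs => rw [pvPieces]
        rw [pvPartition_cons_pos sep c rest h]
        simp [hsep]
      · simp only [PySem.Chars.splitOn.go]
        rw [if_neg (by simp [h])]
        rw [ih rest (c :: cur) acc (by simp at hf ⊢; omega)]
        rw [pvPieces_cons sep cur.reverse c rest h]
        simp

theorem pvSplitOn_eq (l sep : List Char) (hsep : sep ≠ []) :
    PySem.Chars.splitOn l sep = pvPieces sep [] l := by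
  rw [show PySem.Chars.splitOn l sep = PySem.Chars.splitOn.go sep (l.length+1) l [] [] from rfl]
  rw [pvSplitOnGo_eq sep hsep (l.length+1) l [] [] (Nat.lt_succ_self _)]
  simp

-- splitOnMax.go with maxsplit 0 just emits the remainder
theorem pvGo0 (sep : List Char) (fuel : Nat) (l cur : List Char) (acc : List (List Char)) :
    PySem.Chars.splitOnMax.go sep fuel 0 l cur acc = ((cur.reverse ++ l) :: acc).reverse := by
  cases fuel with
  | zero => rfl
  | succ f =>
    cases l with
    | nil => simp [PySem.Chars.splitOnMax.go]
    | cons c rest => simp [PySem.Chars.splitOnMax.go]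

-- splitOnMax.go with maxsplit 1 computes pvPartition
theorem pvGo1 (sep : List Char) (fuel : Nat) (l cur : List Char) (acc : List (List Char))
    (hsep : sep ≠ []) (hf : l.length < fuel) :
    PySem.Chars.splitOnMax.go sep fuel 1 l cur acc =
      (if (pvPartition l sep).2.1.isEmpty then ((cur.reverse ++ l) :: acc).reverse
       else ((pvPartition l sep).2.2 :: (cur.reverse ++ (pvPartition l sep).1) :: acc).reverse) := by
  induction fuel generalizing l cur acc with
  | zero => omega
  | succ f ih =>
    cases l with
    | nil =>
      simp [PySem.Chars.splitOnMax.go, pvPartition]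
    | cons c rest =>
      by_cases h : sep.isPrefixOf (c :: rest)
      · simp only [PySem.Chars.splitOnMax.go, if_neg (one_ne_zero), h]
        rw [pvGo0]
        simp [pvPartition, h, hsep]
      · simp only [PySem.Chars.splitOnMax.go, if_neg (one_ne_zero)]
        rw [if_neg (by simp [h])]
        rw [ih rest (c :: cur) acc (by simp at hf ⊢; omega)]
        simp [pvPartition, h]

-- A's digit-collecting while loop is takeWhile/drop
theorem pvA_digits_eq (l : List Char) :
    pvA_digits l = (l.takeWhile (fun c => PySem.Chars.isdigit c),
      l.drop (l.takeWhile (fun c => PySem.Chars.isdigit c)).length) := by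
  induction l with
  | nil => rfl
  | cons c cs ih =>
    simp only [pvA_digits, List.takeWhile]
    by_cases h : PySem.Chars.isdigit c
    · simp [h, ih]
    · simp [h]

-- B's digit counter counts the same digits
theorem pvB_digits_eq (l : List Char) :
    pvB_digits l = (l.takeWhile (fun c => PySem.Chars.isdigit c)).length := by
  induction l with
  | nil => rfl
  | cons c cs ih =>
    simp only [pvB_digits, List.takeWhile]
    by_cases h : PySem.Chars.isdigit c
    · simp [h, ih]
    · simp [h]

-- the per-part bodies of A's for-loop and B's span parse agree
theorem pvStep_eq : pvA_step = pvB_span := by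
  funext st part
  cases st with
  | none => rfl
  | some edits =>
    simp only [pvA_step, pvB_span]
    by_cases hsw : PySem.Chars.startswith part ("edit_pos".toList)
    · have hlen : 8 ≤ part.length := by
        have hp := (PySem.Chars.startswith_iff part _).mp hsw
        have := hp.length_le
        simpa using this
      rw [if_pos hsw, if_pos (by
        simp only [Bool.and_eq_true, decide_eq_true_eq]
        exact ⟨hlen, hsw⟩)]
      rw [pvA_digits_eq]
      have htk : (part.drop 8).take (pvB_digits (part.drop 8)) =
          (part.drop 8).takeWhile (fun c => PySem.Chars.isdigit c) := by
        rw [pvB_digits_eq]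
        exact (List.prefix_iff_eq_take.mp (List.takeWhile_prefix _)).symm
      rw [htk, pvB_digits_eq]
      cases hint : PySem.Int.ofChars? ((part.drop 8).takeWhile (fun c => PySem.Chars.isdigit c)) with
      | none => rfl
      | some pos =>
        generalize ((part.drop 8).drop ((part.drop 8).takeWhile (fun c => PySem.Chars.isdigit c)).length) = t0
        have htail : (match t0 with | '_' :: t => t | t => t) =
            (if t0.head? = some '_' then t0.tail else t0) := by
          cases t0 with
          | nil => rfl
          | cons c t =>
            by_cases hc : c = '_'
            · subst hc; simp
            · rw [if_neg (by simp [hc])]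
              split
              · rename_i tt heq
                injection heq with h1 h2
                exact absurd h1 hc
              · rfl
        rw [htail]
        generalize (if t0.head? = some '_' then t0.tail else t0) = tail
        have hsep : ("_to_".toList : List Char) ≠ [] := by decide
        rw [pvFind_eq tail _ hsep]
        have hfi := pvPartition_found_iff tail ("_to_".toList) hsep
        have hc := pvPartition_concat tail ("_to_".toList)
        have hsg := pvPartition_sep tail ("_to_".toList)
        rcases hPP : pvPartition tail ("_to_".toList) with ⟨p1, p21, p22⟩
        rw [hPP] at hfi hc hsg
        by_cases he : p21 = []
        · have hIn : PySem.Chars.isIn ("_to_".toList) tail = false :=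
            (PySem.Chars.isIn_eq_false_iff _ _).mpr (hfi.mp he)
          simp only [hIn, he]
          simp
        · have hIn : PySem.Chars.isIn ("_to_".toList) tail = true :=
            (PySem.Chars.isIn_iff_infix _ _).mpr (by
              by_contra hni
              exact he (hfi.mpr hni))
          have hs : p21 = "_to_".toList := hsg he
          have hk : ¬ ((p1.length : Int) = -1) := by
            have h0 : (0:Int) ≤ (p1.length : Int) := Int.natCast_nonneg _
            omega
          have hsplit : PySem.Chars.splitOnMax tail ("_to_".toList) 1 = [p1, p22] := by
            unfold PySem.Chars.splitOnMax
            rw [if_neg (by norm_num)]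
            rw [show ((1 : Int).toNat) = 1 from rfl]
            rw [pvGo1 _ _ _ _ _ hsep (Nat.lt_succ_self _)]
            rw [hPP]
            simp [he]
          have htake : tail.take p1.length = p1 := by
            rw [← hc, List.append_assoc, List.take_left]
          have hdrop : tail.drop (p1.length + 4) = p22 := by
            rw [← hc, List.append_assoc, ← List.drop_drop, List.drop_left, hs]
            rfl
          simp only [hIn, he, hk, if_true, if_false, Int.toNat_natCast, hsplit, htake, hdrop]
          simp
    · rw [if_neg hsw, if_neg (by
        intro hx
        rw [Bool.and_eq_true, decide_eq_true_eq] at hx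
        exact hsw hx.2)]

-- B's find-driven loop consumes exactly the "__"-parts of A's split, in order
theorem pvLoop_eq (fuel : Nat) (l : List Char)
    (st : Option (List (Int × List Char × List Char))) (hf : l.length < fuel) :
    pvB_loop l fuel st = (pvPieces ("__".toList) [] l).foldl pvB_span st := by
  induction fuel generalizing l st with
  | zero => omega
  | succ f ih =>
    have hsep : ("__".toList : List Char) ≠ [] := by decide
    simp only [pvB_loop]
    rw [pvFind_eq l _ hsep]
    conv_rhs => rw [pvPieces]
    have hc := pvPartition_concat l ("__".toList)
    have hsg := pvPartition_sep l ("__".toList)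
    rcases hPP : pvPartition l ("__".toList) with ⟨p1, p21, p22⟩
    rw [hPP] at hc hsg
    by_cases he : p21 = []
    · simp [he]
    · have hs : p21 = "__".toList := hsg he
      have hk : ¬ ((p1.length : Int) = -1) := by
        have h0 : (0:Int) ≤ (p1.length : Int) := Int.natCast_nonneg _
        omega
      have htake : l.take p1.length = p1 := by
        rw [← hc, List.append_assoc, List.take_left]
      have hdrop : l.drop (p1.length + 2) = p22 := by
        rw [← hc, List.append_assoc, ← List.drop_drop, List.drop_left, hs]
        rfl
      have hlt : p22.length < f := by
        have h2 := congrArg List.length hc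
        simp only [List.length_append] at h2
        have hs2 : p21.length = 2 := by rw [hs]; rfl
        omega
      simp only [he, hk, if_false, Int.toNat_natCast, htake, hdrop, List.nil_append,
        List.foldl_cons, dite_false]
      rw [ih _ _ hlt]

-- ===== VERDICT (by name: the statement is the Claim_ definition above) =====
theorem parse_start_signature_spec : Claim_equal_parse_start_signature := by
  intro label _ _
  unfold Spec_parse_start_signature parse_start_signature parse_start_signature_alt
  rw [pvStep_eq, pvSplitOn_eq _ _ (by decide), pvLoop_eq _ _ _ (Nat.lt_succ_self _)]
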